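-- pv_equiv track=rewrite | github.com/bartromgens/timeline-atlas | api/events/management/commands/load_events_by_type.py | _year_ranges
-- ===== SOURCE A (Python) =====
-- def _year_ranges(
--     start_year: int, end_year: int, batch_size: int
-- ) -> list[tuple[int, int]]:
--     ranges: list[tuple[int, int]] = []
--     current = start_year
--     while current <= end_year:
--         batch_end = min(current + batch_size - 1, end_year)
--         ranges.append((current, batch_end))
--         current = batch_end + 1
--     return ranges
-- ===== SOURCE B (Python) =====
-- def _year_ranges(
--     start_year: int, end_year: int, batch_size: int
-- ) -> list[tuple[int, int]]:
--     starts = list(range(start_year, end_year + 1, batch_size))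
--     ends = [s - 1 for s in starts[1:]] + [end_year]
--     return list(zip(starts, ends))
-- ===== Notes on version B (the rewrite author's own statement) =====
-- stated objective: alternative
-- what changed: Replaces the cursor-carrying while-loop (min per batch) with a staged construction: build the list of batch starts via range(start, end+1, batch_size), derive the ends as the shifted starts minus one plus end_year, and zip the two lists.
-- outside the precondition, e.g. on _year_ranges(5, 3, 0): A returns [], B raises ValueError; on _year_ranges(5, 3, -1): A returns [], B returns [(5, 3)]
import Mathlib
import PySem

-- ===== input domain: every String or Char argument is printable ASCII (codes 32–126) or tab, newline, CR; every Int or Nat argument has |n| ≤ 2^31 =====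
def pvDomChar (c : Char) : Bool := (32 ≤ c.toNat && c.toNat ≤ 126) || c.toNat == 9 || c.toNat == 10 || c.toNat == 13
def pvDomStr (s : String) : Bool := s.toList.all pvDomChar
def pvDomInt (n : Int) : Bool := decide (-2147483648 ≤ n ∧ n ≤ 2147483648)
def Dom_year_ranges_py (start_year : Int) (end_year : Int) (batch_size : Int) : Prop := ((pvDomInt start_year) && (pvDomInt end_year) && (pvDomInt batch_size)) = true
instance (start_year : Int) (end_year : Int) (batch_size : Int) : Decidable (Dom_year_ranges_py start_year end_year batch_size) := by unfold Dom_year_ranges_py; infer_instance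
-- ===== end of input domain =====

-- B replaces A's cursor-carrying while-loop with a staged construction: the list of batch starts from range(start, end+1, batch_size), ends derived by shifting the starts, then a zip (objective: alternative decomposition).


-- ===== PORT A =====
-- the while-loop; fuel makes it total (inside Pre_ the fuel always suffices)
def yrLoopA (e b : Int) : Nat → Int → List (Int × Int)
  | 0, _ => []
  | f+1, cur =>
    if cur ≤ e then
      (cur, min (cur + b - 1) e) :: yrLoopA e b f (min (cur + b - 1) e + 1)
    else []

def year_ranges_py (start_year : Int) (end_year : Int) (batch_size : Int) : List (Int × Int) :=
  yrLoopA end_year batch_size (end_year - start_year + 1).toNat start_year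

-- ===== PORT B =====
def year_ranges_py_alt (start_year : Int) (end_year : Int) (batch_size : Int) : List (Int × Int) :=
  let starts := PySem.List.pyRange start_year (end_year + 1) batch_size
  let ends := (PySem.List.slice starts (some 1) none).map (fun s => s - 1) ++ [end_year]
  starts.zip ends

-- ===== PRECONDITION & SPEC =====
-- Pre_ restricts to positive batch_size, the function's natural domain: for batch_size ≤ 0 Python A
-- never returns whenever start_year ≤ end_year, and on the remaining corner end_year < start_year
-- A's empty list is an accident of the loop guard while B's range semantics raise (step 0) or emit
-- a descending batch.
def Pre_year_ranges_py (start_year : Int) (end_year : Int) (batch_size : Int) : Prop :=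
  1 ≤ batch_size
instance (start_year : Int) (end_year : Int) (batch_size : Int) : Decidable (Pre_year_ranges_py start_year end_year batch_size) := by unfold Pre_year_ranges_py; infer_instance
def pvWitness_year_ranges_py : Int × Int × Int := (1990, 2005, 4)

def Spec_year_ranges_py (start_year : Int) (end_year : Int) (batch_size : Int) (out : List (Int × Int)) : Prop := out = year_ranges_py_alt start_year end_year batch_size
instance (start_year : Int) (end_year : Int) (batch_size : Int) (out : List (Int × Int)) : Decidable (Spec_year_ranges_py start_year end_year batch_size out) := by unfold Spec_year_ranges_py; infer_instance

-- ===== CLAIM (what is proved, stated in full; the proofs are below) =====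
def Claim_equal_year_ranges_py : Prop := ∀ (start_year : Int) (end_year : Int) (batch_size : Int), Dom_year_ranges_py start_year end_year batch_size → Pre_year_ranges_py start_year end_year batch_size → Spec_year_ranges_py start_year end_year batch_size (year_ranges_py start_year end_year batch_size)

-- ===== LEMMAS AND PROOFS =====

theorem pyRange_pos_nil (a c s : Int) (hs : 0 < s) (h : c ≤ a) :
    PySem.List.pyRange a c s = [] := by
  rw [PySem.List.pyRange_of_pos _ _ hs, if_neg (by omega)]
  simp

theorem pyRange_pos_cons (a c s : Int) (hs : 0 < s) (h : a < c) :
    PySem.List.pyRange a c s = a :: PySem.List.pyRange (a + s) c s := by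
  rw [PySem.List.pyRange_of_pos _ _ hs, PySem.List.pyRange_of_pos _ _ hs, if_pos h]
  by_cases h2 : a + s < c
  · rw [if_pos h2]
    have hdiv : ((c - a + s - 1) / s) = (c - (a + s) + s - 1) / s + 1 := by
      have := Int.add_mul_ediv_right (c - (a + s) + s - 1) 1 (by omega : s ≠ 0)
      rw [show c - a + s - 1 = c - (a + s) + s - 1 + 1 * s from by ring, this]
    have hpos : 0 ≤ (c - (a + s) + s - 1) / s := Int.ediv_nonneg (by omega) (by omega)
    rw [hdiv, show ((c - (a + s) + s - 1) / s + 1).toNat = ((c - (a + s) + s - 1) / s).toNat + 1 from by omega]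
    rw [List.range_succ_eq_map, List.map_cons, List.map_map]
    congr 1
    · simp
    · apply List.map_congr_left
      intro k _
      simp only [Function.comp_apply]
      push_cast
      ring
  · rw [if_neg h2]
    have h1 : (1 : Int) ≤ (c - a + s - 1) / s :=
      (Int.le_ediv_iff_mul_le hs).mpr (by omega)
    have h2' : (c - a + s - 1) / s < 2 :=
      (Int.ediv_lt_iff_lt_mul hs).mpr (by omega)
    rw [show ((c - a + s - 1) / s).toNat = 1 from by omega]
    simp

theorem yrLoopA_nil (e b : Int) (f : Nat) (cur : Int) (h : e < cur) :
    yrLoopA e b f cur = [] := by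
  cases f with
  | zero => rfl
  | succ f => simp [yrLoopA, not_le.mpr h]

-- the zip-based body of B, as a function of the current start
def yrZipB (e b cur : Int) : List (Int × Int) :=
  let starts := PySem.List.pyRange cur (e + 1) b
  starts.zip ((starts.drop 1).map (fun s => s - 1) ++ [e])

-- loop characterisation: from `cur`, A's loop produces exactly B's zip of starts and shifted starts
theorem yrLoopA_eq_zip (e b : Int) (hb : 1 ≤ b) :
    ∀ (f : Nat) (cur : Int), (e - cur + 1).toNat ≤ f →
    yrLoopA e b f cur = yrZipB e b cur := by
  intro f
  induction f with
  | zero =>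
    intro cur hf
    have h : e < cur := by omega
    rw [yrLoopA_nil e b 0 cur h]
    unfold yrZipB
    rw [pyRange_pos_nil cur (e + 1) b (by omega) (by omega)]
    rfl
  | succ f ih =>
    intro cur hf
    by_cases hc : cur ≤ e
    · have hcons := pyRange_pos_cons cur (e + 1) b (by omega) (by omega)
      by_cases hlast : cur + b ≤ e
      · -- more batches follow
        have hmin : min (cur + b - 1) e = cur + b - 1 := by omega
        have hcons2 := pyRange_pos_cons (cur + b) (e + 1) b (by omega) (by omega)
        have hrec := ih (cur + b) (by omega)
        simp only [yrLoopA, if_pos hc, hmin]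
        unfold yrZipB at hrec ⊢
        rw [hcons, hcons2, show cur + b - 1 + 1 = cur + b from by ring, hrec, hcons2]
        simp [List.zip]
      · -- last batch
        have hmin : min (cur + b - 1) e = e := by omega
        have hnil2 := pyRange_pos_nil (cur + b) (e + 1) b (by omega) (by omega)
        simp only [yrLoopA, if_pos hc, hmin, yrLoopA_nil e b f (e + 1) (by omega)]
        unfold yrZipB
        rw [hcons, hnil2]
        rfl
    · rw [yrLoopA_nil e b (f + 1) cur (by omega)]
      unfold yrZipB
      rw [pyRange_pos_nil cur (e + 1) b (by omega) (by omega)]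
      rfl

-- ===== VERDICT (by name: the statement is the Claim_ definition above) =====
theorem year_ranges_py_spec : Claim_equal_year_ranges_py := by
  intro s e b _ hb
  unfold Spec_year_ranges_py year_ranges_py year_ranges_py_alt
  rw [yrLoopA_eq_zip e b hb _ s (by omega)]
  unfold yrZipB
  show _ = ((PySem.List.pyRange s (e + 1) b).zip
      ((PySem.List.slice (PySem.List.pyRange s (e + 1) b) (some 1) none).map (fun x => x - 1) ++ [e]))
  rw [PySem.List.slice_from _ (by norm_num : (0:Int) ≤ 1)]
  norm_num
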